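-- pv_equiv track=rewrite | github.com/alvlagus/Algorithms_and_data_structures_GB | les_5_task_2.py | hex_list_sum
-- ===== SOURCE A (Python) =====
-- from collections import deque
--
-- hex_to_dec_map = {'0': 0, '1': 1, '2': 2, '3': 3, '4': 4, '5': 5, '6': 6, '7': 7, '8': 8, '9': 9, 'A': 10, 'B': 11,
--                   'C': 12, 'D': 13, 'E': 14, 'F': 15}
--
-- dec_to_hex_map = {0: '0', 1: '1', 2: '2', 3: '3', 4: '4', 5: '5', 6: '6', 7: '7', 8: '8', 9: '9', 10: 'A', 11: 'B',
--                   12: 'C', 13: 'D', 14: 'E', 15: 'F'}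
--
-- def hex_list_sum(n1, n2):
--     n1_len, n2_len = len(n1), len(n2)
--
--     summa = deque()
--     overflow = 0
--     for i in range(0, max(n1_len, n2_len)):
--         s = overflow
--         if i < n1_len:
--             s += hex_to_dec_map[n1[n1_len - i - 1]]
--         if i < n2_len:
--             s += hex_to_dec_map[n2[n2_len - i - 1]]
--         overflow = s // 16
--         s %= 16
--         summa.appendleft(dec_to_hex_map[s])
--
--     if overflow != 0:
--         summa.appendleft(dec_to_hex_map[overflow])
--
--     return list(summa)
-- ===== SOURCE B (Python) =====
-- hex_to_dec_map = {'0': 0, '1': 1, '2': 2, '3': 3, '4': 4, '5': 5, '6': 6, '7': 7, '8': 8, '9': 9, 'A': 10, 'B': 11,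
--                   'C': 12, 'D': 13, 'E': 14, 'F': 15}
--
-- dec_to_hex_map = {0: '0', 1: '1', 2: '2', 3: '3', 4: '4', 5: '5', 6: '6', 7: '7', 8: '8', 9: '9', 10: 'A', 11: 'B',
--                   12: 'C', 13: 'D', 14: 'E', 15: 'F'}
--
-- def hex_list_sum(n1, n2):
--     v = 0
--     for d in n1:
--         v = v * 16 + hex_to_dec_map[d]
--     w = 0
--     for d in n2:
--         w = w * 16 + hex_to_dec_map[d]
--     s = v + w
--     digits = []
--     while s:
--         s, r = divmod(s, 16)
--         digits.append(dec_to_hex_map[r])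
--     digits.reverse()
--     return ['0'] * (max(len(n1), len(n2)) - len(digits)) + digits
-- ===== Notes on version B (the rewrite author's own statement) =====
-- stated objective: idiomatic
-- what changed: B replaces A's digit-by-digit reverse-indexed carry loop with whole-number arithmetic: Horner-convert each list to an integer, add, decompose the sum by repeated divmod(16), and left-pad with '0' to max(len(n1),len(n2)).
import Mathlib
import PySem

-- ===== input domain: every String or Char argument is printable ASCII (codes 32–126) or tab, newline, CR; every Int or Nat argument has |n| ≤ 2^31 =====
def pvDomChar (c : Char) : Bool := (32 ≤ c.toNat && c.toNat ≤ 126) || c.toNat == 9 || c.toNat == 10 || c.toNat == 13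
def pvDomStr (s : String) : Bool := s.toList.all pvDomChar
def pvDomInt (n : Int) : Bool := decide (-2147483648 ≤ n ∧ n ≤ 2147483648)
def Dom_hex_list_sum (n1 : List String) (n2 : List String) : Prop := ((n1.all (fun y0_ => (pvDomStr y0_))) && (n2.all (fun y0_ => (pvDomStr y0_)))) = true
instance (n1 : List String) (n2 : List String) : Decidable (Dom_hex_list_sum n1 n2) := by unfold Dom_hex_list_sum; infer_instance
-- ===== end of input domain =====

-- B replaces A's digit-by-digit reverse-indexed carry loop by whole-number arithmetic:
-- Horner-convert each list to an integer, add, decompose by repeated divmod(16), left-pad with '0'.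

-- ===== PORT A =====
-- module-level dicts, shared by both Pythons
def hexMap : PySem.Dict String Int :=
  PySem.Dict.ofList [("0",0),("1",1),("2",2),("3",3),("4",4),("5",5),("6",6),("7",7),
                     ("8",8),("9",9),("A",10),("B",11),("C",12),("D",13),("E",14),("F",15)]
def decMap : PySem.Dict Int String :=
  PySem.Dict.ofList [(0,"0"),(1,"1"),(2,"2"),(3,"3"),(4,"4"),(5,"5"),(6,"6"),(7,"7"),
                     (8,"8"),(9,"9"),(10,"A"),(11,"B"),(12,"C"),(13,"D"),(14,"E"),(15,"F")]
-- hex_to_dec_map[s] / dec_to_hex_map[n]: KeyError (= none) is excluded by Pre_, total form via getD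
def hd (s : String) : Int := (hexMap.get? s).getD 0
def dh (n : Int) : String := (decMap.get? n).getD ""

def hex_list_sum (n1 : List String) (n2 : List String) : List String :=
  let n1_len : Int := PySem.List.len n1
  let n2_len : Int := PySem.List.len n2
  -- summa is a deque used only via appendleft: ported as a list with cons
  let st := (PySem.List.pyRange 0 (max n1_len n2_len) 1).foldl
    (fun (st : List String × Int) i =>
      let s := st.2
      let s := if i < n1_len then s + hd ((PySem.List.pyGet? n1 (n1_len - i - 1)).getD "") else s
      let s := if i < n2_len then s + hd ((PySem.List.pyGet? n2 (n2_len - i - 1)).getD "") else s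
      let overflow := PySem.Int.floordiv s 16
      let s := PySem.Int.mod s 16
      (dh s :: st.1, overflow))
    ([], 0)
  if st.2 ≠ 0 then dh st.2 :: st.1 else st.1

-- ===== PORT B =====
def hornerVal (n : List String) : Int := n.foldl (fun v d => v * 16 + hd d) 0

-- 'while s: s, r = divmod(s, 16); digits.append(...)'.  s is ≥ 0 whenever the loop is
-- reached (hornerVal is nonnegative), so the 's ≤ 0' totality guard coincides with Python's 's != 0'.
def bDigits (s : Int) (acc : List String) : List String :=
  if _h : s ≤ 0 then acc
  else bDigits (PySem.Int.floordiv s 16) (acc ++ [dh (PySem.Int.mod s 16)])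
termination_by s.toNat
decreasing_by
  have h16 : PySem.Int.floordiv s 16 = s / 16 := PySem.Int.floordiv_eq_ediv_of_pos (by omega)
  rw [h16]
  omega

def hex_list_sum_alt (n1 : List String) (n2 : List String) : List String :=
  let s := hornerVal n1 + hornerVal n2
  let digits := (bDigits s []).reverse
  -- ['0'] * k with k possibly negative gives []; Nat subtraction clamps at 0 the same way
  List.replicate (max n1.length n2.length - digits.length) "0" ++ digits

-- ===== PRECONDITION & SPEC =====
-- Pre_: every element of both lists is a key of hex_to_dec_map (otherwise Python raises KeyError)
def Pre_hex_list_sum (n1 : List String) (n2 : List String) : Prop :=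
  (∀ s ∈ n1, s ∈ ["0","1","2","3","4","5","6","7","8","9","A","B","C","D","E","F"]) ∧
  (∀ s ∈ n2, s ∈ ["0","1","2","3","4","5","6","7","8","9","A","B","C","D","E","F"])
instance (n1 : List String) (n2 : List String) : Decidable (Pre_hex_list_sum n1 n2) := by
  unfold Pre_hex_list_sum; infer_instance
def pvWitness_hex_list_sum : List String × List String := (["1","A"], ["F","F"])

def Spec_hex_list_sum (n1 : List String) (n2 : List String) (out : List String) : Prop := out = hex_list_sum_alt n1 n2
instance (n1 : List String) (n2 : List String) (out : List String) : Decidable (Spec_hex_list_sum n1 n2 out) := by unfold Spec_hex_list_sum; infer_instance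

-- ===== CLAIM (what is proved, stated in full; the proofs are below) =====
def Claim_equal_hex_list_sum : Prop := ∀ (n1 : List String) (n2 : List String), Dom_hex_list_sum n1 n2 → Pre_hex_list_sum n1 n2 → Spec_hex_list_sum n1 n2 (hex_list_sum n1 n2)

-- ===== LEMMAS AND PROOFS =====

-- digit-value bounds hold for EVERY string (default 0), so the lemmas below need no Pre_
lemma hd_bounds (s : String) : 0 ≤ hd s ∧ hd s ≤ 15 := by
  unfold hd
  cases h : hexMap.get? s with
  | none => simp
  | some v =>
    have hm := PySem.Dict.mem_items_of_get?_eq_some hexMap h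
    have e : hexMap.items = [("0",0),("1",1),("2",2),("3",3),("4",4),("5",5),("6",6),("7",7),
      ("8",8),("9",9),("A",10),("B",11),("C",12),("D",13),("E",14),("F",15)] := by rfl
    rw [e] at hm
    simp only [List.mem_cons, List.not_mem_nil, or_false, Prod.mk.injEq] at hm
    simp only [Option.getD_some]
    rcases hm with ⟨-,rfl⟩|⟨-,rfl⟩|⟨-,rfl⟩|⟨-,rfl⟩|⟨-,rfl⟩|⟨-,rfl⟩|⟨-,rfl⟩|⟨-,rfl⟩|⟨-,rfl⟩|⟨-,rfl⟩|⟨-,rfl⟩|⟨-,rfl⟩|⟨-,rfl⟩|⟨-,rfl⟩|⟨-,rfl⟩|⟨-,rfl⟩ <;> omega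

-- little-endian hex digits, exactly k of them
def digLE : Nat → Int → List String
  | 0, _ => []
  | k+1, m => dh (m % 16) :: digLE k (m / 16)

-- little-endian value of a digit list
def valLE : List String → Int
  | [] => 0
  | a :: as => hd a + 16 * valLE as

-- little-endian digit-by-digit addition with carry: the semantics of A's loop body
def addLE : List String → List String → Int → List String × Int
  | [], [], c => ([], c)
  | a :: as, [], c =>
      let s := c + hd a
      let p := addLE as [] (s / 16)
      (dh (s % 16) :: p.1, p.2)
  | [], b :: bs, c =>
      let s := c + hd b
      let p := addLE [] bs (s / 16)
      (dh (s % 16) :: p.1, p.2)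
  | a :: as, b :: bs, c =>
      let s := c + hd a + hd b
      let p := addLE as bs (s / 16)
      (dh (s % 16) :: p.1, p.2)

lemma length_digLE (k : Nat) (m : Int) : (digLE k m).length = k := by
  induction k generalizing m with
  | zero => rfl
  | succ k ih => simp [digLE, ih]

lemma step_mod (s T : Int) : (s + 16 * T) % 16 = s % 16 := by omega
lemma step_div (s T : Int) : (s + 16 * T) / 16 = s / 16 + T := by omega
lemma step_pow (s T : Int) (k : Nat) : (s / 16 + T) / 16 ^ k = (s + 16 * T) / 16 ^ (k + 1) := by
  rw [pow_succ, mul_comm ((16:Int)^k) 16, ← Int.ediv_ediv_eq_ediv_mul, step_div] <;> norm_num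

lemma addLE_spec (as bs : List String) (c : Int) :
    addLE as bs c = (digLE (max as.length bs.length) (c + valLE as + valLE bs),
                     (c + valLE as + valLE bs) / 16 ^ (max as.length bs.length)) := by
  fun_induction addLE as bs c with
  | case1 c => simp [valLE, digLE]
  | case2 a as c s p ih =>
    simp only [valLE, List.length_cons, List.length_nil]
    have hM : c + (hd a + 16 * valLE as) + 0 = s + 16 * (valLE as + 0) := by simp [s]; ring
    have hmax : max (as.length + 1) 0 = max as.length 0 + 1 := by omega
    rw [hmax, hM, digLE, ← step_mod s (valLE as + 0), step_mod, ← step_pow,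
      ← step_div, step_div]
    simp only [p, ih]
    simp [valLE]
  | case3 b bs c s p ih =>
    simp only [valLE, List.length_cons, List.length_nil]
    have hM : c + 0 + (hd b + 16 * valLE bs) = s + 16 * (0 + valLE bs) := by simp [s]; ring
    have hmax : max 0 (bs.length + 1) = max 0 bs.length + 1 := by omega
    rw [hmax, hM, digLE, ← step_mod s (0 + valLE bs), step_mod, ← step_pow,
      ← step_div, step_div]
    simp only [p, ih]
    simp [valLE]
  | case4 a as b bs c s p ih =>
    simp only [valLE, List.length_cons]
    have hM : c + (hd a + 16 * valLE as) + (hd b + 16 * valLE bs)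
        = s + 16 * (valLE as + valLE bs) := by simp [s]; ring
    have hmax : max (as.length + 1) (bs.length + 1) = max as.length bs.length + 1 := by omega
    rw [hmax, hM, digLE, ← step_mod s (valLE as + valLE bs), step_mod, ← step_pow,
      ← step_div, step_div]
    simp only [p, ih]
    simp [add_assoc]

lemma valLE_nonneg (as : List String) : 0 ≤ valLE as := by
  induction as with
  | nil => simp [valLE]
  | cons a as ih => have := (hd_bounds a).1; simp [valLE]; omega

lemma valLE_lt (as : List String) : valLE as < 16 ^ as.length := by
  induction as with
  | nil => simp [valLE]
  | cons a as ih =>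
    have h1 := (hd_bounds a).2
    simp only [valLE, List.length_cons, pow_succ]
    have : (0:Int) < 16 ^ as.length := by positivity
    nlinarith

lemma valLE_append (xs : List String) (a : String) :
    valLE (xs ++ [a]) = valLE xs + hd a * 16 ^ xs.length := by
  induction xs with
  | nil => simp [valLE]
  | cons x xs ih => simp [valLE, ih, pow_succ]; ring

lemma horner_gen (n : List String) : ∀ v : Int,
    n.foldl (fun v d => v * 16 + hd d) v = v * 16 ^ n.length + valLE n.reverse := by
  induction n with
  | nil => intro v; simp [valLE]
  | cons a as ih =>
    intro v
    simp only [List.foldl_cons, ih, List.reverse_cons, valLE_append, List.length_cons,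
      List.length_reverse, pow_succ]
    ring

lemma horner_eq (n : List String) : hornerVal n = valLE n.reverse := by
  unfold hornerVal; rw [horner_gen]; simp

lemma rev_get (l : List String) (i0 : Nat) (h : i0 < l.length) :
    (PySem.List.pyGet? l ((l.length : Int) - (i0:Int) - 1)).getD ""
      = l.reverse[i0]'(by simpa using h) := by
  have e : ((l.length : Int) - (i0:Int) - 1) = ((l.length - 1 - i0 : Nat) : Int) := by omega
  rw [e, PySem.List.pyGet?_natCast, List.getElem?_eq_getElem (by omega), Option.getD_some,
    List.getElem_reverse]

lemma loop_inv (n1 n2 : List String) : ∀ (k i0 : Nat) (j : Int), j = i0 →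
    i0 + k = max n1.length n2.length →
    ∀ (acc : List String) (c : Int),
    (PySem.List.pyRange j (max (PySem.List.len n1) (PySem.List.len n2)) 1).foldl
      (fun (st : List String × Int) i =>
        let s := st.2
        let s := if i < PySem.List.len n1 then
            s + hd ((PySem.List.pyGet? n1 (PySem.List.len n1 - i - 1)).getD "") else s
        let s := if i < PySem.List.len n2 then
            s + hd ((PySem.List.pyGet? n2 (PySem.List.len n2 - i - 1)).getD "") else s
        (dh (PySem.Int.mod s 16) :: st.1, PySem.Int.floordiv s 16))
      (acc, c)
    = ((addLE (n1.reverse.drop i0) (n2.reverse.drop i0) c).1.reverse ++ acc,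
       (addLE (n1.reverse.drop i0) (n2.reverse.drop i0) c).2) := by
  intro k
  induction k with
  | zero =>
    intro i0 j hj hi0 acc c
    subst hj
    simp only [PySem.List.len_eq]
    rw [PySem.List.pyRange_one_eq_nil (by omega)]
    rw [List.drop_eq_nil_of_le (by simp; omega), List.drop_eq_nil_of_le (by simp; omega)]
    simp [addLE]
  | succ k ih =>
    intro i0 j hj hi0 acc c
    subst hj
    simp only [PySem.List.len_eq]
    rw [PySem.List.pyRange_one_cons (by omega), List.foldl_cons]
    simp only []
    rw [PySem.Int.mod_eq_emod_of_pos (by norm_num), PySem.Int.floordiv_eq_ediv_of_pos (by norm_num)]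
    have hstep : ((i0 : Int) + 1) = ((i0 + 1 : Nat) : Int) := by push_cast; ring
    rw [hstep]
    have ih' := ih (i0 + 1) _ rfl (by omega)
    simp only [PySem.List.len_eq] at ih'
    rw [ih']
    by_cases h1 : i0 < n1.length <;> by_cases h2 : i0 < n2.length
    · rw [if_pos (show (i0:Int) < (n1.length : Int) by omega),
        if_pos (show (i0:Int) < (n2.length : Int) by omega), rev_get n1 i0 h1, rev_get n2 i0 h2]
      rw [List.drop_eq_getElem_cons (l := n1.reverse) (i := i0) (by simpa using h1),
        List.drop_eq_getElem_cons (l := n2.reverse) (i := i0) (by simpa using h2)]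
      simp [addLE]
    · rw [if_pos (show (i0:Int) < (n1.length : Int) by omega),
        if_neg (show ¬ ((i0:Int) < (n2.length : Int)) by omega), rev_get n1 i0 h1]
      rw [List.drop_eq_getElem_cons (l := n1.reverse) (i := i0) (by simpa using h1),
        List.drop_eq_nil_of_le (as := n2.reverse) (by simp; omega),
        List.drop_eq_nil_of_le (as := n2.reverse) (by simp; omega)]
      simp [addLE]
    · rw [if_neg (show ¬ ((i0:Int) < (n1.length : Int)) by omega),
        if_pos (show (i0:Int) < (n2.length : Int) by omega), rev_get n2 i0 h2]
      rw [List.drop_eq_getElem_cons (l := n2.reverse) (i := i0) (by simpa using h2),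
        List.drop_eq_nil_of_le (as := n1.reverse) (by simp; omega),
        List.drop_eq_nil_of_le (as := n1.reverse) (by simp; omega)]
      simp [addLE]
    · omega

lemma port_eq (n1 n2 : List String) :
    hex_list_sum n1 n2 =
      (let st := (PySem.List.pyRange 0 (max (PySem.List.len n1) (PySem.List.len n2)) 1).foldl
        (fun (st : List String × Int) i =>
          let s := st.2
          let s := if i < PySem.List.len n1 then
              s + hd ((PySem.List.pyGet? n1 (PySem.List.len n1 - i - 1)).getD "") else s
          let s := if i < PySem.List.len n2 then
              s + hd ((PySem.List.pyGet? n2 (PySem.List.len n2 - i - 1)).getD "") else s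
          (dh (PySem.Int.mod s 16) :: st.1, PySem.Int.floordiv s 16))
        ([], 0)
      if st.2 ≠ 0 then dh st.2 :: st.1 else st.1) := rfl

lemma loopA (n1 n2 : List String) :
    hex_list_sum n1 n2 =
      (let p := addLE n1.reverse n2.reverse 0;
       if p.2 ≠ 0 then dh p.2 :: p.1.reverse else p.1.reverse) := by
  rw [port_eq,
    loop_inv n1 n2 (max n1.length n2.length) 0 0 (by norm_num) (by omega) [] 0]
  simp

lemma bDigits_stop (s : Int) (acc : List String) (h : s ≤ 0) : bDigits s acc = acc := by
  rw [bDigits]; simp [h]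

lemma bDigits_step (s : Int) (acc : List String) (h : 0 < s) :
    bDigits s acc = bDigits (s / 16) (acc ++ [dh (s % 16)]) := by
  conv_lhs => rw [bDigits]
  rw [dif_neg (by omega)]
  rw [PySem.Int.floordiv_eq_ediv_of_pos (show (0:Int) < 16 by norm_num),
    PySem.Int.mod_eq_emod_of_pos (show (0:Int) < 16 by norm_num)]

lemma bDigits_acc_aux : ∀ (n : Nat) (s : Int), s.toNat ≤ n →
    ∀ acc, bDigits s acc = acc ++ bDigits s [] := by
  intro n
  induction n with
  | zero =>
    intro s hs acc
    rw [bDigits_stop _ _ (by omega), bDigits_stop _ _ (by omega), List.append_nil]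
  | succ n ih =>
    intro s hs acc
    by_cases h : s ≤ 0
    · rw [bDigits_stop _ _ h, bDigits_stop _ _ h, List.append_nil]
    · have hdd : (s / 16).toNat ≤ n := by omega
      rw [bDigits_step s acc (by omega), bDigits_step s [] (by omega)]
      rw [ih _ hdd (acc ++ [dh (s % 16)]), ih _ hdd ([] ++ [dh (s % 16)])]
      simp

lemma bDigits_acc (s : Int) (acc : List String) : bDigits s acc = acc ++ bDigits s [] :=
  bDigits_acc_aux s.toNat s le_rfl acc

lemma bDigits_pos (s : Int) (h : 0 < s) :
    bDigits s [] = dh (s % 16) :: bDigits (s / 16) [] := by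
  rw [bDigits_step _ _ h, bDigits_acc]
  simp

lemma digLE_zero (k : Nat) : digLE k 0 = List.replicate k "0" := by
  induction k with
  | zero => rfl
  | succ k ih =>
    rw [digLE]
    have h1 : (0:Int) % 16 = 0 := by norm_num
    have h2 : (0:Int) / 16 = 0 := by norm_num
    rw [h1, h2, ih, List.replicate_succ]
    congr 1

lemma digLE_eq (k : Nat) (m : Int) (h0 : 0 ≤ m) (h : m < 16 ^ k) :
    digLE k m = bDigits m [] ++ List.replicate (k - (bDigits m []).length) "0" := by
  induction k generalizing m with
  | zero =>
    have : m = 0 := by omega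
    subst this
    rw [bDigits_stop 0 [] le_rfl]
    rfl
  | succ k ih =>
    by_cases hm : m = 0
    · subst hm
      rw [bDigits_stop 0 [] le_rfl, digLE_zero]
      simp
    · rw [bDigits_pos m (by omega), digLE]
      have hd0 : 0 ≤ m / 16 := Int.ediv_nonneg h0 (by norm_num)
      have hlt : m / 16 < 16 ^ k := by
        rw [Int.ediv_lt_iff_lt_mul (by norm_num)]
        calc m < 16 ^ (k+1) := h
        _ = 16 ^ k * 16 := by ring
      rw [ih (m / 16) hd0 hlt]
      simp [List.length_cons, Nat.succ_sub_succ]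

lemma digLE_carry (k : Nat) (m : Int) (h1 : 16 ^ k ≤ m) (h2 : m < 16 ^ (k+1)) :
    bDigits m [] = digLE k m ++ [dh (m / 16 ^ k)] := by
  induction k generalizing m with
  | zero =>
    have h1' : 1 ≤ m := by simpa using h1
    have h2' : m < 16 := by norm_num at h2; omega
    rw [bDigits_pos m (by omega), Int.emod_eq_of_lt (by omega) h2',
      Int.ediv_eq_zero_of_lt (by omega) h2', bDigits_stop 0 [] le_rfl]
    simp [digLE]
  | succ k ih =>
    rw [bDigits_pos m (by have hp := pow_pos (show (0:Int) < 16 by norm_num) (k+1); omega), digLE]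
    have hlo : 16 ^ k ≤ m / 16 := by
      rw [Int.le_ediv_iff_mul_le (by norm_num)]
      calc (16:Int) ^ k * 16 = 16 ^ (k+1) := by ring
      _ ≤ m := h1
    have hhi : m / 16 < 16 ^ (k+1) := by
      rw [Int.ediv_lt_iff_lt_mul (by norm_num)]
      calc m < 16 ^ (k+1+1) := h2
      _ = 16 ^ (k+1) * 16 := by ring
    rw [ih (m / 16) hlo hhi]
    have hdd : m / 16 / 16 ^ k = m / 16 ^ (k + 1) := by
      rw [Int.ediv_ediv_eq_ediv_mul, ← pow_succ'] <;> norm_num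
    rw [hdd]
    simp

lemma altB (n1 n2 : List String) :
    hex_list_sum_alt n1 n2 =
      List.replicate (max n1.length n2.length
          - ((bDigits (hornerVal n1 + hornerVal n2) []).reverse).length) "0"
        ++ (bDigits (hornerVal n1 + hornerVal n2) []).reverse := rfl

-- ===== VERDICT (by name: the statement is the Claim_ definition above) =====
theorem hex_list_sum_spec : Claim_equal_hex_list_sum := by
  intro n1 n2 _ _
  unfold Spec_hex_list_sum
  rw [loopA, altB]
  have hmax : max n1.reverse.length n2.reverse.length = max n1.length n2.length := by simp
  set L := max n1.length n2.length with hL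
  rw [addLE_spec]
  simp only [hmax]
  set T := valLE n1.reverse + valLE n2.reverse with hTdef
  have hT : hornerVal n1 + hornerVal n2 = T := by rw [horner_eq, horner_eq]
  have hz : (0:Int) + valLE n1.reverse + valLE n2.reverse = T := by rw [hTdef]; ring
  rw [hz, hT]
  have h0 : 0 ≤ T := by
    have := valLE_nonneg n1.reverse; have := valLE_nonneg n2.reverse; omega
  have hb1 : valLE n1.reverse < 16 ^ L := by
    calc valLE n1.reverse < 16 ^ n1.reverse.length := valLE_lt _
    _ ≤ 16 ^ L := by
        apply pow_le_pow_right₀ (by norm_num)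
        simp [hL]
  have hb2 : valLE n2.reverse < 16 ^ L := by
    calc valLE n2.reverse < 16 ^ n2.reverse.length := valLE_lt _
    _ ≤ 16 ^ L := by
        apply pow_le_pow_right₀ (by norm_num)
        simp [hL]
  by_cases hc : T < 16 ^ L
  · have c0 : T / 16 ^ L = 0 := Int.ediv_eq_zero_of_lt h0 hc
    rw [c0, if_neg (by simp)]
    rw [digLE_eq L T h0 hc]
    simp [List.reverse_append]
  · have hge : 16 ^ L ≤ T := by omega
    have hhi : T < 16 ^ (L + 1) := by
      have hp : (0:Int) < 16 ^ L := by positivity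
      calc T < 16 ^ L + 16 ^ L := by omega
      _ ≤ 16 ^ (L+1) := by rw [pow_succ]; nlinarith
    have hc1 : 1 ≤ T / 16 ^ L := by
      rw [Int.le_ediv_iff_mul_le (by positivity)]
      simpa using hge
    rw [if_pos (by omega)]
    rw [digLE_carry L T hge hhi]
    simp [List.reverse_append, length_digLE]
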